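-- pv_equiv track=rewrite | github.com/adkinss/adventofcode | 2023/src/day_10.py | zoom_in
-- ===== SOURCE A (Python) =====
-- def zoom_in(field):
--     """
--     Create a new zoomed in field from the one provided. Connect pipes as
--     approprate so that there are no gaps after zooming in.
--     """
--     max_rows = len(field)
--     max_cols = len(field[0])
--
--     new_max_rows = 2 * max_rows - 1
--     new_max_cols = 2 * max_cols - 1
--
--     # Initialize a bigger field.
--     zoom_field = []
--     for r in range(new_max_rows):
--         zoom_field.append(["."] * (new_max_cols))
--
--     for r in range(max_rows):
--         for c in range(max_cols):
--             this_pipe = field[r][c]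
--             zoom_field[2 * r][2 * c] = this_pipe
--             if this_pipe == "-":
--                 if 2 * c - 1 >= 0:
--                     zoom_field[2 * r][2 * c - 1] = "-"
--                 if 2 * c + 1 < new_max_cols:
--                     zoom_field[2 * r][2 * c + 1] = "-"
--             if this_pipe == "|":
--                 if 2 * r - 1 >= 0:
--                     zoom_field[2 * r - 1][2 * c] = "|"
--                 if 2 * r + 1 < new_max_rows:
--                     zoom_field[2 * r + 1][2 * c] = "|"
--             if this_pipe == "F":
--                 if 2 * c + 1 < new_max_cols:
--                     zoom_field[2 * r][2 * c + 1] = "-"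
--                 if 2 * r + 1 < new_max_rows:
--                     zoom_field[2 * r + 1][2 * c] = "|"
--             if this_pipe == "7":
--                 if 2 * c - 1 >= 0:
--                     zoom_field[2 * r][2 * c - 1] = "-"
--                 if 2 * r + 1 < new_max_rows:
--                     zoom_field[2 * r + 1][2 * c] = "|"
--             if this_pipe == "J":
--                 if 2 * r - 1 >= 0:
--                     zoom_field[2 * r - 1][2 * c] = "|"
--                 if 2 * c - 1 >= 0:
--                     zoom_field[2 * r][c * 2 - 1] = "-"
--             if this_pipe == "L":
--                 if 2 * r - 1 >= 0:
--                     zoom_field[2 * r - 1][2 * c] = "|"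
--                 if 2 * c + 1 < new_max_cols:
--                     zoom_field[2 * r][2 * c + 1] = "-"
--
--     return zoom_field
-- ===== SOURCE B (Python) =====
-- OPENS = {"-": "WE", "|": "NS", "F": "ES", "7": "WS", "J": "NW", "L": "NE"}
--
--
-- def zoom_in(field):
--     """
--     Create a new zoomed in field from the one provided. Connect pipes as
--     approprate so that there are no gaps after zooming in.
--     """
--     rows = len(field)
--     cols = len(field[0])
--
--     def cell(i, j):
--         if i % 2 == 1:
--             if j % 2 == 0 and ("S" in OPENS.get(field[i // 2][j // 2], "")
--                                or "N" in OPENS.get(field[i // 2 + 1][j // 2], "")):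
--                 return "|"
--             return "."
--         if j % 2 == 1:
--             if ("E" in OPENS.get(field[i // 2][j // 2], "")
--                     or "W" in OPENS.get(field[i // 2][j // 2 + 1], "")):
--                 return "-"
--             return "."
--         return field[i // 2][j // 2]
--
--     return [[cell(i, j) for j in range(2 * cols - 1)]
--             for i in range(2 * rows - 1)]
-- ===== Notes on version B (the rewrite author's own statement) =====
-- stated objective: simpler
-- what changed: A scatters: it mutates a pre-filled grid, each source cell writing its own connectors into up to four neighbouring gap cells; B gathers: it builds the zoomed grid pointwise with one pure cell(i,j) function that looks up a direction table (pipe -> opened directions) and decides each gap cell from its two adjacent source cells, so there is no mutation and no aliasing.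
import Mathlib
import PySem

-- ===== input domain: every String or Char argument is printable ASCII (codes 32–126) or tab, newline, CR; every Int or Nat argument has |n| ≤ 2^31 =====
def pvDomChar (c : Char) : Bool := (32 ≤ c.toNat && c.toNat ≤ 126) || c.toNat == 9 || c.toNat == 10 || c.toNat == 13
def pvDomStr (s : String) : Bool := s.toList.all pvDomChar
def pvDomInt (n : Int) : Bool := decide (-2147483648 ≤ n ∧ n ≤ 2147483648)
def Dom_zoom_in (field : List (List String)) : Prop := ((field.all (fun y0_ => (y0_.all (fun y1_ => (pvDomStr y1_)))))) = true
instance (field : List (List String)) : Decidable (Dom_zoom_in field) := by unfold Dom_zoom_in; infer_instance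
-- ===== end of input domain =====

-- B rebuilds the zoomed grid pointwise (gather, via a pipe→directions table) where A
-- initialises a grid and scatters connector writes from each source cell; same return value.
-- A mutates only its own freshly created list, so no argument is mutated.

-- ===== PORT A =====
-- Python's in-range `zoom_field[i][j] = v` store is pvSet2 (List.set); all of A's index
-- assignments are in range under Pre_, where this is exact.  pvBlkP is one of A's
-- `if this_pipe == x:` blocks: its two guarded writes in A's order.
def pvSet2 (g : List (List String)) (i j : Nat) (v : String) : List (List String) :=
  g.set i ((g.getD i []).set j v)

def pvBlkP (p x : String) (z : List (List String))
    (g1 : Prop) [Decidable g1] (i1 j1 : Nat) (v1 : String)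
    (g2 : Prop) [Decidable g2] (i2 j2 : Nat) (v2 : String) : List (List String) :=
  if p = x then
    let z := if g1 then pvSet2 z i1 j1 v1 else z
    if g2 then pvSet2 z i2 j2 v2 else z
  else z

def pvStepA (field : List (List String)) (nRows nCols : Nat) (r : Nat)
    (z : List (List String)) (c : Nat) : List (List String) :=
  let p := (field.getD r []).getD c ""
  let z := pvSet2 z (2*r) (2*c) p
  let z := pvBlkP p "-" z ((0:Int) ≤ 2*(c:Int)-1) (2*r) (2*c-1) "-" (2*c+1 < nCols) (2*r) (2*c+1) "-"
  let z := pvBlkP p "|" z ((0:Int) ≤ 2*(r:Int)-1) (2*r-1) (2*c) "|" (2*r+1 < nRows) (2*r+1) (2*c) "|"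
  let z := pvBlkP p "F" z (2*c+1 < nCols) (2*r) (2*c+1) "-" (2*r+1 < nRows) (2*r+1) (2*c) "|"
  let z := pvBlkP p "7" z ((0:Int) ≤ 2*(c:Int)-1) (2*r) (2*c-1) "-" (2*r+1 < nRows) (2*r+1) (2*c) "|"
  let z := pvBlkP p "J" z ((0:Int) ≤ 2*(r:Int)-1) (2*r-1) (2*c) "|" ((0:Int) ≤ 2*(c:Int)-1) (2*r) (c*2-1) "-"
  let z := pvBlkP p "L" z ((0:Int) ≤ 2*(r:Int)-1) (2*r-1) (2*c) "|" (2*c+1 < nCols) (2*r) (2*c+1) "-"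
  z

def zoom_in (field : List (List String)) : List (List String) :=
  let maxRows := field.length
  let maxCols := (field.headD []).length
  let newMaxRows := 2 * maxRows - 1
  let newMaxCols := 2 * maxCols - 1
  let init := (List.range newMaxRows).map (fun _ => List.replicate newMaxCols ".")
  (List.range maxRows).foldl
    (fun z r => (List.range maxCols).foldl (pvStepA field newMaxRows newMaxCols r) z) init

def pvOpens (p : String) : List Char :=
  if p = "-" then ['W','E'] else if p = "|" then ['N','S'] else if p = "F" then ['E','S']
  else if p = "7" then ['W','S'] else if p = "J" then ['N','W'] else if p = "L" then ['N','E']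
  else []

def pvCellB (field : List (List String)) (i j : Nat) : String :=
  if i % 2 = 1 then
    if j % 2 = 0 ∧ ('S' ∈ pvOpens ((field.getD (i/2) []).getD (j/2) "") ∨
                    'N' ∈ pvOpens ((field.getD (i/2+1) []).getD (j/2) "")) then "|" else "."
  else if j % 2 = 1 then
    if 'E' ∈ pvOpens ((field.getD (i/2) []).getD (j/2) "") ∨
       'W' ∈ pvOpens ((field.getD (i/2) []).getD (j/2+1) "") then "-" else "."
  else (field.getD (i/2) []).getD (j/2) ""

def zoom_in_alt (field : List (List String)) : List (List String) :=
  let rows := field.length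
  let cols := (field.headD []).length
  (List.range (2*rows-1)).map (fun i => (List.range (2*cols-1)).map (fun j => pvCellB field i j))

-- ===== PRECONDITION & SPEC =====
-- Pre_ excludes exactly the inputs where Python A raises IndexError: the empty field
-- (field[0]) and fields having a row shorter than the first row (field[r][c] out of range).
def Pre_zoom_in (field : List (List String)) : Prop :=
  field ≠ [] ∧ ∀ row ∈ field, (field.headD []).length ≤ row.length
instance (field : List (List String)) : Decidable (Pre_zoom_in field) := by
  unfold Pre_zoom_in; infer_instance

def pvWitness_zoom_in : List (List String) := [["F", "7"], ["L", "J"]]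

def Spec_zoom_in (field : List (List String)) (out : List (List String)) : Prop := out = zoom_in_alt field
instance (field : List (List String)) (out : List (List String)) : Decidable (Spec_zoom_in field out) := by unfold Spec_zoom_in; infer_instance

-- ===== CLAIM (what is proved, stated in full; the proofs are below) =====
def Claim_equal_zoom_in : Prop := ∀ (field : List (List String)), Dom_zoom_in field → Pre_zoom_in field → Spec_zoom_in field (zoom_in field)

-- ===== LEMMAS AND PROOFS =====
-- Plan: pvPhi describes the grid contents of A's scatter loop after fully processing rows < r
-- and, in row r, columns < c; pv_step_get characterises one loop body, pv_phi_step/pv_phi_row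
-- advance the invariant, and at r = #rows pvPhi coincides with B's pure cell function pvCellB,
-- giving zoom_in = zoom_in_alt on every input (pv_main).

def pvGet2 (g : List (List String)) (a b : Nat) : String := (g.getD a []).getD b ""

def pvR (field : List (List String)) : Nat := field.length

def pvC (field : List (List String)) : Nat := (field.headD []).length

def pvNR (field : List (List String)) : Nat := 2 * pvR field - 1

def pvNC (field : List (List String)) : Nat := 2 * pvC field - 1

def pvF (field : List (List String)) (r c : Nat) : String := (field.getD r []).getD c ""

abbrev pvE (p : String) : Prop := 'E' ∈ pvOpens p

abbrev pvW (p : String) : Prop := 'W' ∈ pvOpens p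

abbrev pvN (p : String) : Prop := 'N' ∈ pvOpens p

abbrev pvS (p : String) : Prop := 'S' ∈ pvOpens p

lemma pv_getD_set {α : Type} (g : List α) (i : Nat) (v d : α) (a : Nat) :
    (g.set i v).getD a d = if a = i ∧ i < g.length then v else g.getD a d := by
  simp [List.getD_eq_getElem?_getD, List.getElem?_set]
  split_ifs <;> simp_all

lemma pv_get2_set2 (g : List (List String)) (i j : Nat) (v : String) (a b : Nat) :
    pvGet2 (pvSet2 g i j v) a b =
      if a = i ∧ b = j ∧ i < g.length ∧ j < (g.getD i []).length then v
      else pvGet2 g a b := by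
  unfold pvGet2 pvSet2
  rw [pv_getD_set]
  by_cases hai : a = i ∧ i < g.length
  · rw [if_pos hai]
    obtain ⟨rfl, hil⟩ := hai
    have hg : g.getD a [] = g[a] := List.getD_eq_getElem g [] hil
    rw [pv_getD_set, hg]
    split_ifs <;> simp_all
  · rw [if_neg hai]
    split_ifs with h
    · exact absurd ⟨h.1, h.2.2.1⟩ hai
    · rfl

lemma pv_rowlen_set2 (g : List (List String)) (i j : Nat) (v : String) (a : Nat) :
    ((pvSet2 g i j v).getD a []).length = (g.getD a []).length := by
  unfold pvSet2
  rw [pv_getD_set]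
  split_ifs <;> simp_all

def pvDims (z : List (List String)) (nR nC : Nat) : Prop :=
  z.length = nR ∧ ∀ a : Nat, (z.getD a []).length = if a < nR then nC else 0

lemma pv_len_set2 (g : List (List String)) (i j : Nat) (v : String) :
    (pvSet2 g i j v).length = g.length := by simp [pvSet2]

lemma pv_dims_set2 {g : List (List String)} {nR nC : Nat} (h : pvDims g nR nC)
    {i j : Nat} {v : String} : pvDims (pvSet2 g i j v) nR nC :=
  ⟨by rw [pv_len_set2]; exact h.1, fun a => by rw [pv_rowlen_set2]; exact h.2 a⟩

lemma pv_dims_blkP {z : List (List String)} {nR nC : Nat} (h : pvDims z nR nC)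
    {p x : String} {g1 : Prop} [Decidable g1] {i1 j1 : Nat} {v1 : String}
    {g2 : Prop} [Decidable g2] {i2 j2 : Nat} {v2 : String} :
    pvDims (pvBlkP p x z g1 i1 j1 v1 g2 i2 j2 v2) nR nC := by
  simp only [pvBlkP]
  split_ifs <;> (repeat first | exact h | apply pv_dims_set2)

lemma pv_get2_set2' {z : List (List String)} {nR nC : Nat} (hd : pvDims z nR nC)
    {i j : Nat} {v : String} (a b : Nat) :
    pvGet2 (pvSet2 z i j v) a b =
      if a = i ∧ b = j ∧ i < nR ∧ j < nC then v else pvGet2 z a b := by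
  rw [pv_get2_set2, hd.1, hd.2 i]
  split_ifs <;> simp_all <;> omega

set_option maxHeartbeats 1000000 in
lemma pv_get2_blkP {z : List (List String)} {nR nC : Nat} (hd : pvDims z nR nC)
    {p x : String} {g1 : Prop} [Decidable g1] {i1 j1 : Nat} {v1 : String}
    {g2 : Prop} [Decidable g2] {i2 j2 : Nat} {v2 : String} (a b : Nat) :
    pvGet2 (pvBlkP p x z g1 i1 j1 v1 g2 i2 j2 v2) a b =
      if p = x ∧ g2 ∧ a = i2 ∧ b = j2 ∧ i2 < nR ∧ j2 < nC then v2
      else if p = x ∧ g1 ∧ a = i1 ∧ b = j1 ∧ i1 < nR ∧ j1 < nC then v1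
      else pvGet2 z a b := by
  by_cases hpx : p = x <;> by_cases h1 : g1 <;> by_cases h2 : g2 <;>
    simp only [pvBlkP, hpx, h1, h2, ite_true, ite_false, eq_self_iff_true] <;>
    (try rw [pv_get2_set2' (pv_dims_set2 hd)]) <;>
    (try rw [pv_get2_set2' hd]) <;> split_ifs <;> tauto

lemma pv_dims_stepA (field : List (List String)) (nR nC r c : Nat)
    {z : List (List String)} (h : pvDims z nR nC) :
    pvDims (pvStepA field nR nC r z c) nR nC := by
  simp only [pvStepA]
  repeat first | exact h | apply pv_dims_blkP | apply pv_dims_set2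

set_option maxHeartbeats 2000000 in
lemma pv_step_get (field : List (List String)) (r c : Nat)
    (z : List (List String)) (hd : pvDims z (pvNR field) (pvNC field))
    (a b : Nat) (ha : a < pvNR field) (hb : b < pvNC field) :
    pvGet2 (pvStepA field (pvNR field) (pvNC field) r z c) a b =
      if a = 2*r ∧ b = 2*c ∧ 2*r < pvNR field ∧ 2*c < pvNC field then pvF field r c
      else if a = 2*r ∧ b = 2*c+1 ∧ 2*c+1 < pvNC field ∧ 2*r < pvNR field ∧ pvE (pvF field r c) then "-"
      else if a = 2*r ∧ b+1 = 2*c ∧ 2*r < pvNR field ∧ pvW (pvF field r c) then "-"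
      else if a = 2*r+1 ∧ b = 2*c ∧ 2*r+1 < pvNR field ∧ 2*c < pvNC field ∧ pvS (pvF field r c) then "|"
      else if a+1 = 2*r ∧ b = 2*c ∧ 1 ≤ r ∧ 2*c < pvNC field ∧ pvN (pvF field r c) then "|"
      else pvGet2 z a b := by
  have h0 := pv_dims_set2 hd (i := 2*r) (j := 2*c) (v := (field.getD r []).getD c "")
  simp only [pvStepA, pvF]
  rw [pv_get2_blkP (pv_dims_blkP (pv_dims_blkP (pv_dims_blkP (pv_dims_blkP (pv_dims_blkP h0)))))]
  rw [pv_get2_blkP (pv_dims_blkP (pv_dims_blkP (pv_dims_blkP (pv_dims_blkP h0))))]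
  rw [pv_get2_blkP (pv_dims_blkP (pv_dims_blkP (pv_dims_blkP h0)))]
  rw [pv_get2_blkP (pv_dims_blkP (pv_dims_blkP h0))]
  rw [pv_get2_blkP (pv_dims_blkP h0)]
  rw [pv_get2_blkP h0]
  rw [pv_get2_set2' hd]
  by_cases h1 : (field.getD r []).getD c "" = "-" <;> by_cases h2 : (field.getD r []).getD c "" = "|" <;>
    by_cases h3 : (field.getD r []).getD c "" = "F" <;> by_cases h4 : (field.getD r []).getD c "" = "7" <;>
    by_cases h5 : (field.getD r []).getD c "" = "J" <;> by_cases h6 : (field.getD r []).getD c "" = "L" <;>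
    simp only [h1, h2, h3, h4, h5, h6, pvE, pvW, pvN, pvS, pvOpens, String.reduceEq,
      ite_true, ite_false, if_true, if_false, List.mem_cons, List.not_mem_nil,
      reduceCtorEq, Char.reduceEq, or_false, false_or, or_true, true_or, and_true, true_and,
      and_false, false_and, not_false_iff] <;>
    split_ifs <;> first | rfl | omega

def pvPhi (field : List (List String)) (r c a b : Nat) : String :=
  if a % 2 = 0 then
    if a < 2*r then pvCellB field a b
    else if a = 2*r then
      (if b % 2 = 0 then (if b < 2*c then pvF field r (b/2) else ".")
       else (if (pvE (pvF field r (b/2)) ∧ b/2 < c) ∨ (pvW (pvF field r (b/2+1)) ∧ b/2+1 < c)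
             then "-" else "."))
    else "."
  else
    if a+1 < 2*r then pvCellB field a b
    else if a+1 = 2*r then
      (if b % 2 = 0 ∧ (pvS (pvF field (a/2) (b/2)) ∨ (pvN (pvF field r (b/2)) ∧ b/2 < c))
       then "|" else ".")
    else if a = 2*r+1 then
      (if b % 2 = 0 ∧ pvS (pvF field r (b/2)) ∧ b/2 < c then "|" else ".")
    else "."

lemma pvPhi_other (field : List (List String)) (r c c' a b : Nat)
    (h1 : a ≠ 2*r) (h2 : a+1 ≠ 2*r) (h3 : a ≠ 2*r+1) :
    pvPhi field r c a b = pvPhi field r c' a b := by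
  unfold pvPhi
  split_ifs <;> first | rfl | omega

set_option maxHeartbeats 1000000 in
lemma pv_phi_step (field : List (List String)) (r c : Nat)
    (z : List (List String)) (hd : pvDims z (pvNR field) (pvNC field))
    (hz : ∀ a b, a < pvNR field → b < pvNC field → pvGet2 z a b = pvPhi field r c a b)
    (a b : Nat) (ha : a < pvNR field) (hb : b < pvNC field) :
    pvGet2 (pvStepA field (pvNR field) (pvNC field) r z c) a b = pvPhi field r (c+1) a b := by
  rw [pv_step_get field r c z hd a b ha hb, hz a b ha hb]
  by_cases hA : a = 2*r
  · subst hA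
    by_cases hb0 : b = 2*c
    · -- center cell
      subst hb0
      rw [if_pos ⟨rfl, rfl, ha, hb⟩]
      simp only [pvPhi, (by omega : 2*c % 2 = 0), (by omega : 2*c < 2*(c+1)),
        (by omega : 2*c/2 = c), eq_self_iff_true, if_true, if_false, ite_true, ite_false]
      split_ifs <;> first | rfl | omega
    · by_cases hb1 : b = 2*c+1
      · -- gap cell east of the centre
        subst hb1
        rw [if_neg (by intro h; omega)]
        simp only [pvPhi, hb, ha, (by omega : ¬(2*c+1 = 2*c)), (by omega : 2*c % 2 = 0),
          (by omega : ¬((2*c+1) % 2 = 0)), (by omega : ¬(2*r < 2*r)),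
          (by omega : (2*c+1)/2 = c), (by omega : (2*c+1)/2+1 = c+1), (by omega : c+1-1 = c),
          (by omega : ¬(c < c)), (by omega : c < c+1), (by omega : ¬(c+1 < c)),
          (by omega : ¬(c+1 < c+1)),
          eq_self_iff_true, if_true, if_false, ite_true, ite_false, true_and, and_true,
          false_and, and_false, or_false, false_or]
        split_ifs <;> first | rfl | omega | tauto | simp_all | (exfalso; simp_all)
      · by_cases hb2 : b+1 = 2*c
        · -- gap cell west of the centre
          rw [if_neg (by intro h; omega), if_neg (fun h => absurd h.2.1 (by omega))]
          simp only [pvPhi, hb2, ha, (by omega : 2*r % 2 = 0), (by omega : ¬(2*r < 2*r)),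
            (by omega : ¬(b % 2 = 0)), (by omega : b/2 = c-1), (by omega : b/2+1 = c),
            (by omega : c-1+1 = c),
            (by omega : c-1 < c), (by omega : c-1 < c+1), (by omega : ¬(c < c)),
            (by omega : c < c+1),
            eq_self_iff_true, if_true, if_false, ite_true, ite_false, true_and, and_true,
            false_and, and_false, or_false, false_or]
          split_ifs <;> first | rfl | omega | tauto | simp_all | (exfalso; simp_all)
        · -- untouched cell in row 2r
          rw [if_neg (by intro h; omega), if_neg (fun h => absurd h.2.1 (by omega)),
            if_neg (fun h => absurd h.2.1 (by omega)), if_neg (fun h => absurd h.1 (by omega)),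
            if_neg (fun h => absurd h.1 (by omega))]
          by_cases hpb : b % 2 = 0
          · simp only [pvPhi, (by omega : 2*r % 2 = 0), (by omega : ¬(2*r < 2*r)),
              eq_self_iff_true, if_true, if_false, ite_true, ite_false,
              (by omega : (b < 2*c) ↔ (b < 2*(c+1)))]
            split_ifs <;> first | rfl | omega
          · simp only [pvPhi, (by omega : 2*r % 2 = 0), (by omega : ¬(2*r < 2*r)),
              eq_self_iff_true, if_true, if_false, ite_true, ite_false,
              (by omega : (b/2 < c) ↔ (b/2 < c+1)), (by omega : (b/2+1 < c) ↔ (b/2+1 < c+1))]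
            split_ifs <;> first | rfl | omega
  · by_cases hB : a = 2*r+1
    · subst hB
      by_cases hb0 : b = 2*c
      · subst hb0
        rw [if_neg (by intro h; omega), if_neg (fun h => absurd h.1 (by omega)),
          if_neg (fun h => absurd h.1 (by omega))]
        simp only [pvPhi, ha, hb, (by omega : ¬((2*r+1) % 2 = 0)), (by omega : ¬(2*r+1+1 < 2*r)),
          (by omega : ¬(2*r+1+1 = 2*r)), (by omega : 2*c % 2 = 0), (by omega : 2*c/2 = c),
          (by omega : ¬(c < c)), (by omega : c < c+1),
          eq_self_iff_true, if_true, if_false, ite_true, ite_false, true_and, and_true,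
          false_and, and_false, or_false, false_or]
        split_ifs <;> first | rfl | omega | tauto | simp_all | (exfalso; simp_all)
      · rw [if_neg (by intro h; omega), if_neg (fun h => absurd h.1 (by omega)),
          if_neg (fun h => absurd h.1 (by omega)), if_neg (fun h => absurd h.2.1 (by omega)),
          if_neg (fun h => absurd h.1 (by omega))]
        by_cases hpb : b % 2 = 0
        · simp only [pvPhi, hpb, (by omega : ¬((2*r+1) % 2 = 0)), (by omega : ¬(2*r+1+1 < 2*r)),
            (by omega : ¬(2*r+1+1 = 2*r)), eq_self_iff_true, if_true, if_false,
            ite_true, ite_false, true_and, (by omega : (b/2 < c) ↔ (b/2 < c+1))]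
          split_ifs <;> first | rfl | omega
        · simp only [pvPhi, hpb, false_and, and_false, if_false, ite_false]
          split_ifs <;> first | rfl | omega
    · by_cases hC : a+1 = 2*r
      · by_cases hb0 : b = 2*c
        · subst hb0
          rw [if_neg (by intro h; omega), if_neg (fun h => absurd h.1 (by omega)),
            if_neg (fun h => absurd h.1 (by omega)), if_neg (fun h => absurd h.1 (by omega))]
          simp only [pvPhi, hC, hb, (by omega : 1 ≤ r), (by omega : ¬(a % 2 = 0)),
            (by omega : ¬(a+1 < 2*r)), (by omega : 2*c % 2 = 0), (by omega : 2*c/2 = c),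
            (by omega : ¬(c < c)), (by omega : c < c+1),
            eq_self_iff_true, if_true, if_false, ite_true, ite_false, true_and, and_true,
            false_and, and_false, or_false, false_or]
          split_ifs <;> first | rfl | omega | tauto | simp_all | (exfalso; simp_all)
        · rw [if_neg (by intro h; omega), if_neg (fun h => absurd h.1 (by omega)),
            if_neg (fun h => absurd h.1 (by omega)), if_neg (fun h => absurd h.1 (by omega)),
            if_neg (fun h => absurd h.2.1 (by omega))]
          by_cases hpb : b % 2 = 0
          · simp only [pvPhi, hpb, hC, (by omega : ¬(a % 2 = 0)), (by omega : ¬(a+1 < 2*r)),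
              eq_self_iff_true, if_true, if_false, ite_true, ite_false, true_and,
              (by omega : (b/2 < c) ↔ (b/2 < c+1))]
            split_ifs <;> first | rfl | omega
          · simp only [pvPhi, hpb, false_and, and_false, if_false, ite_false]
            split_ifs <;> first | rfl | omega
      · rw [if_neg (by intro h; omega), if_neg (fun h => absurd h.1 (by omega)),
          if_neg (fun h => absurd h.1 (by omega)), if_neg (fun h => absurd h.1 (by omega)),
          if_neg (fun h => absurd h.1 (by omega))]
        exact pvPhi_other field r c (c+1) a b hA hC hB

lemma pv_dims_init (field : List (List String)) :
    pvDims ((List.range (pvNR field)).map (fun _ => List.replicate (pvNC field) "."))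
      (pvNR field) (pvNC field) := by
  constructor
  · simp
  · intro a
    by_cases h : a < pvNR field
    · rw [if_pos h, List.getD_eq_getElem _ _ (by simpa using h)]
      simp
    · rw [if_neg h, List.getD_eq_default _ _ (by simpa using h)]
      simp

lemma pvPhi_zero (field : List (List String)) (a b : Nat) : pvPhi field 0 0 a b = "." := by
  unfold pvPhi
  split_ifs <;> first | rfl | omega | simp_all

lemma pv_get2_init (field : List (List String)) (a b : Nat)
    (ha : a < pvNR field) (hb : b < pvNC field) :
    pvGet2 ((List.range (pvNR field)).map (fun _ => List.replicate (pvNC field) ".")) a b =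
      pvPhi field 0 0 a b := by
  rw [pvPhi_zero]
  unfold pvGet2
  have hconst : (List.range (pvNR field)).map (fun _ => List.replicate (pvNC field) ".") =
      List.replicate (pvNR field) (List.replicate (pvNC field) ".") := by
    simp
  rw [hconst]
  simp only [List.getD_eq_getElem?_getD, List.getElem?_replicate]
  rw [if_pos ha]
  simp [List.getElem?_replicate, hb]

lemma pv_phi_row (field : List (List String)) (r : Nat) (hr : r < pvR field)
    (a b : Nat) (ha : a < pvNR field) (hb : b < pvNC field) :
    pvPhi field r (pvC field) a b = pvPhi field (r+1) 0 a b := by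
  have ha' : a < 2 * pvR field - 1 := ha
  have hb' : b < 2 * pvC field - 1 := hb
  by_cases hA : a = 2*r
  · subst hA
    by_cases hpb : b % 2 = 0
    · simp only [pvPhi, pvCellB, pvF, hpb, (by omega : 2*r % 2 = 0), (by omega : ¬(2*r % 2 = 1)),
        (by omega : ¬(2*r < 2*r)), (by omega : 2*r < 2*(r+1)), (by omega : (2*r)/2 = r),
        (by omega : ¬(b % 2 = 1)), (by omega : b < 2 * pvC field),
        eq_self_iff_true, if_true, ite_true, if_false, ite_false]
        <;> try (split_ifs <;> first | rfl | omega | simp_all)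
    · simp only [pvPhi, pvCellB, pvF, pvE, pvW, hpb, (by omega : 2*r % 2 = 0),
        (by omega : ¬(2*r % 2 = 1)), (by omega : ¬(2*r < 2*r)), (by omega : 2*r < 2*(r+1)),
        (by omega : (2*r)/2 = r), (by omega : b % 2 = 1), (by omega : b/2 < pvC field),
        (by omega : b/2+1 < pvC field),
        eq_self_iff_true, if_true, ite_true, if_false, ite_false, and_true, true_and]
        <;> try (split_ifs <;> first | rfl | omega | simp_all)
  · by_cases hB : a = 2*r+1
    · subst hB
      by_cases hpb : b % 2 = 0
      · simp only [pvPhi, pvCellB, pvF, pvS, pvN, hpb, (by omega : ¬((2*r+1) % 2 = 0)),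
          (by omega : (2*r+1) % 2 = 1), (by omega : ¬(2*r+1+1 < 2*r)), (by omega : ¬(2*r+1+1 = 2*r)),
          (by omega : ¬(2*r+1+1 < 2*(r+1))), (by omega : 2*r+1+1 = 2*(r+1)),
          (by omega : (2*r+1)/2 = r), (by omega : (2*r+1)/2+1 = r+1), (by omega : ¬(b/2 < 0)),
          (by omega : b/2 < pvC field), eq_self_iff_true, if_true, ite_true, if_false, ite_false,
          and_true, true_and, and_false, false_and, or_false, false_or]
        <;> try (split_ifs <;> first | rfl | omega | simp_all)
      · simp only [pvPhi, hpb, false_and, and_false, if_false, ite_false,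
          (by omega : ¬((2*r+1) % 2 = 0)), (by omega : ¬(2*r+1+1 < 2*r)),
          (by omega : ¬(2*r+1+1 = 2*r)), (by omega : ¬(2*r+1+1 < 2*(r+1))),
          (by omega : 2*r+1+1 = 2*(r+1)), eq_self_iff_true, if_true, ite_true]
        <;> try (split_ifs <;> first | rfl | omega | simp_all)
    · by_cases hC : a+1 = 2*r
      · by_cases hpb : b % 2 = 0
        · simp only [pvPhi, pvCellB, pvF, pvS, pvN, hpb, (by omega : ¬(a % 2 = 0)),
            (by omega : a % 2 = 1), (by omega : ¬(a+1 < 2*r)), hC, (by omega : a+1 < 2*(r+1)),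
            (by omega : a/2+1 = r), (by omega : b/2 < pvC field),
            eq_self_iff_true, if_true, ite_true, if_false, ite_false, and_true, true_and]
          <;> try (split_ifs <;> first | rfl | omega | simp_all)
        · simp only [pvPhi, pvCellB, hpb, false_and, and_false, if_false, ite_false,
            (by omega : ¬(a % 2 = 0)), (by omega : a % 2 = 1), (by omega : ¬(a+1 < 2*r)), hC,
            (by omega : a+1 < 2*(r+1)), (by omega : ¬(b % 2 = 0)),
            eq_self_iff_true, if_true, ite_true]
          <;> try (split_ifs <;> first | rfl | omega | simp_all)
      · simp only [pvPhi, (by omega : ¬(b/2 < 0)), (by omega : ¬(b/2+1 < 0)),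
          (by omega : ¬(b < 2*0)), and_false, false_and, false_or, or_false, if_false, ite_false]
        split_ifs <;> first | rfl | omega | simp_all

lemma pv_phi_final (field : List (List String))
    (a b : Nat) (ha : a < pvNR field) (hb : b < pvNC field) :
    pvPhi field (pvR field) 0 a b = pvCellB field a b := by
  have ha' : a < 2 * pvR field - 1 := ha
  unfold pvPhi
  split_ifs <;> first | rfl | omega

lemma pv_inner (field : List (List String)) (rr : Nat) (z : List (List String))
    (hd : pvDims z (pvNR field) (pvNC field))
    (hz : ∀ a b, a < pvNR field → b < pvNC field → pvGet2 z a b = pvPhi field rr 0 a b) :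
    ∀ c : Nat,
      pvDims ((List.range c).foldl (pvStepA field (pvNR field) (pvNC field) rr) z)
        (pvNR field) (pvNC field) ∧
      ∀ a b, a < pvNR field → b < pvNC field →
        pvGet2 ((List.range c).foldl (pvStepA field (pvNR field) (pvNC field) rr) z) a b =
          pvPhi field rr c a b := by
  intro c
  induction c with
  | zero => exact ⟨hd, hz⟩
  | succ c ih =>
    rw [List.range_succ]
    simp only [List.foldl_append, List.foldl_cons, List.foldl_nil]
    exact ⟨pv_dims_stepA field _ _ rr c ih.1,
      fun a b ha hb => pv_phi_step field rr c _ ih.1 ih.2 a b ha hb⟩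

lemma pv_outer (field : List (List String)) :
    ∀ r : Nat, r ≤ pvR field →
      pvDims ((List.range r).foldl
          (fun z rr => (List.range (pvC field)).foldl (pvStepA field (pvNR field) (pvNC field) rr) z)
          ((List.range (pvNR field)).map (fun _ => List.replicate (pvNC field) ".")))
        (pvNR field) (pvNC field) ∧
      ∀ a b, a < pvNR field → b < pvNC field →
        pvGet2 ((List.range r).foldl
          (fun z rr => (List.range (pvC field)).foldl (pvStepA field (pvNR field) (pvNC field) rr) z)
          ((List.range (pvNR field)).map (fun _ => List.replicate (pvNC field) "."))) a b =
          pvPhi field r 0 a b := by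
  intro r
  induction r with
  | zero =>
    intro _
    exact ⟨pv_dims_init field, fun a b ha hb => pv_get2_init field a b ha hb⟩
  | succ r ih =>
    intro hr
    have ihr := ih (by omega)
    rw [List.range_succ]
    simp only [List.foldl_append, List.foldl_cons, List.foldl_nil]
    refine ⟨(pv_inner field r _ ihr.1 ihr.2 (pvC field)).1, fun a b ha hb => ?_⟩
    rw [(pv_inner field r _ ihr.1 ihr.2 (pvC field)).2 a b ha hb,
      pv_phi_row field r (by omega) a b ha hb]

lemma pv_main (field : List (List String)) : zoom_in field = zoom_in_alt field := by
  have h := pv_outer field (pvR field) le_rfl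
  have hzoom : zoom_in field = (List.range (pvR field)).foldl
      (fun z rr => (List.range (pvC field)).foldl (pvStepA field (pvNR field) (pvNC field) rr) z)
      ((List.range (pvNR field)).map (fun _ => List.replicate (pvNC field) ".")) := rfl
  have halt : (zoom_in_alt field).length = pvNR field := by
    simp [zoom_in_alt, pvNR, pvR]
  apply List.ext_getElem
  · rw [hzoom, h.1.1, halt]
  · intro n h1 h2
    have hn : n < pvNR field := by rw [hzoom, h.1.1] at h1; exact h1
    have hrowA : (zoom_in field)[n] = (zoom_in field).getD n [] :=
      (List.getD_eq_getElem _ _ h1).symm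
    have hrowlen : ((zoom_in field).getD n []).length = pvNC field := by
      rw [hzoom]
      rw [h.1.2 n, if_pos hn]
    apply List.ext_getElem
    · rw [hrowA, hrowlen]
      simp [zoom_in_alt, pvNC, pvC, (by simpa [zoom_in_alt] using h2 : n < 2 * field.length - 1)]
    · intro b hb1 hb2
      have hbn : b < pvNC field := by rw [hrowA, hrowlen] at hb1; exact hb1
      have hL : pvGet2 (zoom_in field) n b = (zoom_in field)[n][b] := by
        unfold pvGet2
        rw [show (zoom_in field).getD n [] = (zoom_in field)[n] from List.getD_eq_getElem _ _ h1]
        exact List.getD_eq_getElem _ _ hb1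
      rw [← hL]
      have : pvGet2 (zoom_in field) n b = pvCellB field n b := by
        rw [hzoom, h.2 n b hn hbn, pv_phi_final field n b hn hbn]
      rw [this]
      simp [zoom_in_alt]

-- ===== VERDICT (by name: the statement is the Claim_ definition above) =====
theorem zoom_in_spec : Claim_equal_zoom_in := by
  intro field _ _
  unfold Spec_zoom_in
  exact pv_main field
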